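-- pv_equiv track=rewrite | github.com/josebelmiro/branch_bound | podas.py | propagar_local
-- ===== SOURCE A (Python) =====
-- from collections import deque
--
-- def propagar_local(contador_vizinhos, grafo, start_vertices, atribuicoes):
--     fila = deque(start_vertices)
--     visitado = set()
--     while fila:
--         v = fila.popleft()
--         if v in visitado:
--             continue
--         visitado.add(v)
--         val_v = atribuicoes[v]
--         if val_v == -1:
--             continue
--         # checar inviabilidade de v
--         if val_v == 0:
--             if contador_vizinhos[v][2] == 0 and contador_vizinhos[v][-1] == 0:
--                 return False
--         elif val_v in (1, 2):
--             if (contador_vizinhos[v][1] + contador_vizinhos[v][2]) == 0 and contador_vizinhos[v][-1] == 0: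
--                 return False
--         # enfileirar vizinhos que dependem de v
--         for u in grafo[v]:
--             fila.append(u)
--     return True
-- ===== SOURCE B (Python) =====
-- def _inviavel(contador_vizinhos, val, v):
--     if val == 0:
--         return contador_vizinhos[v][2] == 0 and contador_vizinhos[v][-1] == 0
--     if val in (1, 2):
--         return (contador_vizinhos[v][1] + contador_vizinhos[v][2]) == 0 and contador_vizinhos[v][-1] == 0
--     return False
--
-- def propagar_local(contador_vizinhos, grafo, start_vertices, atribuicoes):
--     # Level-synchronous saturation, no queue and no per-vertex visited test:
--     # grow the reachable set frontier by frontier by sweeping the adjacency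
--     # table, checking each frontier (in sorted order) as it is reached.
--     reachable = set()
--     expandable = set()  # reached, assigned (!= -1) and feasible
--     new = set(start_vertices)
--     while new:
--         for v in sorted(new):
--             val = atribuicoes[v]
--             if val == -1:
--                 continue
--             if _inviavel(contador_vizinhos, val, v):
--                 return False
--             expandable.add(v)
--         reachable |= new
--         new = {u for v, vizinhos in grafo.items() if v in expandable
--                  for u in vizinhos if u not in reachable}
--     return True
-- ===== Notes on version B (the rewrite author's own statement) =====
-- stated objective: alternative
-- what changed: A's FIFO-queue BFS with a per-pop visited test is replaced by a queue-free level-synchronous saturation: each iteration checks the whole newly reached frontier (in sorted order) against the same infeasibility conditions, then derives the next frontier by one sweep of the adjacency table over the accumulated feasible vertices.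
-- outside the precondition, e.g. on propagar_local({1: {2: 0, -1: 0}}, {}, [1, 0], {1: 0}): A returns False, B raises KeyError
import Mathlib
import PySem

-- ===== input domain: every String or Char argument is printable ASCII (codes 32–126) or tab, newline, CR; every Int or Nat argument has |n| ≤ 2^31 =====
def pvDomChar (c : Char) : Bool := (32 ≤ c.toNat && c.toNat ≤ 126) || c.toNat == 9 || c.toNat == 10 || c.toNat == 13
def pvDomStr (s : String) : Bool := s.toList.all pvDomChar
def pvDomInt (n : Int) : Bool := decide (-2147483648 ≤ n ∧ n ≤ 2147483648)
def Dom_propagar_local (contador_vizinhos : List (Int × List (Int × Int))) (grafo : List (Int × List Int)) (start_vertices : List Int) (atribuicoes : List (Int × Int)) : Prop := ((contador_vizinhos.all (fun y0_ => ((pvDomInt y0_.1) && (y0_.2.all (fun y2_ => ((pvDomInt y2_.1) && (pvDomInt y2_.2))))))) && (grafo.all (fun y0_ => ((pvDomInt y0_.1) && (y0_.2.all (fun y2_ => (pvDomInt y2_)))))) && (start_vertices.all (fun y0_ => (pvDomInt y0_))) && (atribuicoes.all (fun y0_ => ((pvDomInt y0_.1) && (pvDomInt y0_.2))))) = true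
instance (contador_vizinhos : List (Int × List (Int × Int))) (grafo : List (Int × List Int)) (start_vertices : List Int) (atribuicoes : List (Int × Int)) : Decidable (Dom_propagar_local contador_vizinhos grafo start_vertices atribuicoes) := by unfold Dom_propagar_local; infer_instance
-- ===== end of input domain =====

-- B replaces A's FIFO-queue BFS (pop, visited test, check, enqueue neighbours) by a queue-free
-- level-synchronous saturation: each iteration checks the whole newly reached frontier in sorted order
-- and derives the next frontier by one sweep of the adjacency table. Objective: alternative (equal
-- values on every input Pre_ admits; outside Pre_ the raise-vs-False outcome is traversal-order luck).

-- ===== PORT A =====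
-- Python's `while fila` loop ported as fuel recursion; the fuel (number of pops) is bounded by
-- len(start_vertices) + total length of all neighbour lists + 1, which is always sufficient since each
-- vertex's neighbours are enqueued at most once (on its single unvisited pop).
-- Dict lookups that raise KeyError in Python (atribuicoes[v] / contador_vizinhos[v] missing) are outside Pre_;
-- there this port skips the vertex (missing atribuicoes) resp. reads an empty counter dict (missing contador_vizinhos).
def pvLoopA (contador : List (Int × List (Int × Int))) (grafo : List (Int × List Int)) (atrib : List (Int × Int)) : Nat → List Int → PySem.Set Int → Bool
  | _, [], _ => true
  | 0, _ :: _, _ => true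
  | n+1, v :: rest, vis =>
    if v ∈ vis then pvLoopA contador grafo atrib n rest vis
    else
      let vis' := PySem.Set.add vis v
      match (PySem.Dict.mk atrib).get? v with
      | none => pvLoopA contador grafo atrib n rest vis'
      | some val =>
        if val = -1 then pvLoopA contador grafo atrib n rest vis'
        else
          let cv := PySem.Dict.mk ((PySem.Dict.mk contador).getD v [])
          let enqueue := pvLoopA contador grafo atrib n (rest ++ (PySem.Dict.mk grafo).getD v []) vis'
          if val = 0 then
            if cv.getD 2 0 = 0 ∧ cv.getD (-1) 0 = 0 then false else enqueue
          else if val = 1 ∨ val = 2 then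
            if cv.getD 1 0 + cv.getD 2 0 = 0 ∧ cv.getD (-1) 0 = 0 then false else enqueue
          else enqueue

def propagar_local (contador_vizinhos : List (Int × List (Int × Int))) (grafo : List (Int × List Int)) (start_vertices : List Int) (atribuicoes : List (Int × Int)) : Bool :=
  pvLoopA contador_vizinhos grafo atribuicoes
    (start_vertices.length + (grafo.map (fun p => p.2.length)).sum + 1) start_vertices PySem.Set.empty

-- ===== PORT B =====
-- Source B's `_inviavel` helper (val is the already-read assignment of v).
def pvInviavelVal (contador : List (Int × List (Int × Int))) (val : Int) (v : Int) : Bool :=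
  let cv := PySem.Dict.mk ((PySem.Dict.mk contador).getD v [])
  if val = 0 then decide (cv.getD 2 0 = 0 ∧ cv.getD (-1) 0 = 0)
  else if val = 1 ∨ val = 2 then decide (cv.getD 1 0 + cv.getD 2 0 = 0 ∧ cv.getD (-1) 0 = 0)
  else false

-- Source B's `for v in sorted(new): …` body: none = the `return False` inside the loop,
-- some exp' = the grown `expandable` set
def pvLayer (contador : List (Int × List (Int × Int))) (atrib : List (Int × Int)) : List Int → PySem.Set Int → Option (PySem.Set Int)
  | [], exp => some exp
  | v :: rest, exp =>
    let val := (PySem.Dict.mk atrib).getD v (-1)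
    if val = -1 then pvLayer contador atrib rest exp
    else if pvInviavelVal contador val v then none
    else pvLayer contador atrib rest (PySem.Set.add exp v)

-- Source B's frontier comprehension: one sweep of the adjacency table
def pvSweep (grafo : List (Int × List Int)) (exp reach : PySem.Set Int) : PySem.Set Int :=
  grafo.foldl (fun acc p =>
    if p.1 ∈ exp then
      p.2.foldl (fun acc u => if u ∈ reach then acc else PySem.Set.add acc u) acc
    else acc) PySem.Set.empty

-- Source B's `while new` loop as fuel recursion; every iteration moves the non-empty frontier into
-- `reachable`, which stays inside start ++ all neighbour lists, so this fuel is always sufficient.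
def pvLoopB (contador : List (Int × List (Int × Int))) (grafo : List (Int × List Int)) (atrib : List (Int × Int)) : Nat → PySem.Set Int → PySem.Set Int → PySem.Set Int → Bool
  | _, _, _, [] => true
  | 0, _, _, _ :: _ => true
  | n+1, reach, exp, new =>
    match pvLayer contador atrib (PySem.List.sorted new (fun x => x)) exp with
    | none => false
    | some exp' =>
      let reach' := PySem.Set.update reach new
      pvLoopB contador grafo atrib n reach' exp' (pvSweep grafo exp' reach')

def propagar_local_alt (contador_vizinhos : List (Int × List (Int × Int))) (grafo : List (Int × List Int)) (start_vertices : List Int) (atribuicoes : List (Int × Int)) : Bool :=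
  pvLoopB contador_vizinhos grafo atribuicoes
    (start_vertices.length + (grafo.map (fun p => p.2.length)).sum + 1)
    PySem.Set.empty PySem.Set.empty (PySem.Set.ofList start_vertices)

-- ===== PRECONDITION & SPEC =====
-- The common infeasibility predicate, total via dict defaults (false where the value is missing or -1).
def pvInfeasible (contador : List (Int × List (Int × Int))) (atrib : List (Int × Int)) (v : Int) : Bool :=
  let val := (PySem.Dict.mk atrib).getD v (-1)
  let cv := PySem.Dict.mk ((PySem.Dict.mk contador).getD v [])
  if val = 0 then decide (cv.getD 2 0 = 0 ∧ cv.getD (-1) 0 = 0)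
  else if val = 1 ∨ val = 2 then decide (cv.getD 1 0 + cv.getD 2 0 = 0 ∧ cv.getD (-1) 0 = 0)
  else false

-- Every dict lookup the Python A performs at vertex v succeeds (mirroring the `and` short-circuits).
def pvCovered (contador : List (Int × List (Int × Int))) (grafo : List (Int × List Int)) (atrib : List (Int × Int)) (v : Int) : Bool :=
  match (PySem.Dict.mk atrib).get? v with
  | none => false
  | some val =>
    if val = -1 then true
    else
      (PySem.Dict.mk grafo).contains v &&
      (if val = 0 then
         match (PySem.Dict.mk contador).get? v with
         | none => false
         | some cvl =>
           let cv := PySem.Dict.mk cvl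
           cv.contains 2 && (decide (cv.getD 2 0 ≠ 0) || cv.contains (-1))
       else if val = 1 ∨ val = 2 then
         match (PySem.Dict.mk contador).get? v with
         | none => false
         | some cvl =>
           let cv := PySem.Dict.mk cvl
           cv.contains 1 && cv.contains 2 && (decide (cv.getD 1 0 + cv.getD 2 0 ≠ 0) || cv.contains (-1))
       else true)

-- an upper bound on the number of distinct propagation targets (used only as an iteration bound)
def pvUniverse (grafo : List (Int × List Int)) (start : List Int) (atrib : List (Int × Int)) : List Int :=
  start ++ (grafo.filterMap (fun p => if (PySem.Dict.mk atrib).getD p.1 (-1) = -1 then none else some p.2)).flatten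

-- one closure step: add the neighbour lists of every reachable graph key that is covered, assigned (≠ -1)
-- and feasible (propagation in A stops at -1 vertices and at infeasible ones, which return False)
def pvCloseOnce (contador : List (Int × List (Int × Int))) (grafo : List (Int × List Int)) (atrib : List (Int × Int)) (R : PySem.Set Int) : PySem.Set Int :=
  PySem.Set.update R ((grafo.filterMap (fun p =>
    if p.1 ∈ R ∧ pvCovered contador grafo atrib p.1 = true ∧
        (PySem.Dict.mk atrib).getD p.1 (-1) ≠ -1 ∧ pvInfeasible contador atrib p.1 = false
    then some p.2 else none)).flatten)

-- the vertices reachable from the start vertices through checked, feasible propagation;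
-- iterating |pvUniverse| times reaches the fixed point
def pvReachableSet (contador : List (Int × List (Int × Int))) (grafo : List (Int × List Int)) (start : List Int) (atrib : List (Int × Int)) : PySem.Set Int :=
  (pvCloseOnce contador grafo atrib)^[(pvUniverse grafo start atrib).length] (PySem.Set.ofList start)

-- Pre_ requires (i) the grafo association list to encode a Python dict (unique keys) and (ii) every vertex
-- reachable through feasible propagation to have the dict entries A reads (otherwise some traversal hits a
-- missing key and the outcome — KeyError, or an early False first — is an accident of visit order; A raises
-- on most such inputs, and excluded inputs where A happens to return False are listed in the cites).
def Pre_propagar_local (contador_vizinhos : List (Int × List (Int × Int))) (grafo : List (Int × List Int)) (start_vertices : List Int) (atribuicoes : List (Int × Int)) : Prop :=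
  (grafo.map Prod.fst).Nodup ∧
  (pvReachableSet contador_vizinhos grafo start_vertices atribuicoes).all
    (pvCovered contador_vizinhos grafo atribuicoes) = true
instance (contador_vizinhos : List (Int × List (Int × Int))) (grafo : List (Int × List Int)) (start_vertices : List Int) (atribuicoes : List (Int × Int)) : Decidable (Pre_propagar_local contador_vizinhos grafo start_vertices atribuicoes) := by unfold Pre_propagar_local; infer_instance

def pvWitness_propagar_local : (List (Int × List (Int × Int))) × (List (Int × List Int)) × List Int × (List (Int × Int)) :=
  ([], [(0, [])], [0], [(0, -1)])

def Spec_propagar_local (contador_vizinhos : List (Int × List (Int × Int))) (grafo : List (Int × List Int)) (start_vertices : List Int) (atribuicoes : List (Int × Int)) (out : Bool) : Prop := out = propagar_local_alt contador_vizinhos grafo start_vertices atribuicoes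
instance (contador_vizinhos : List (Int × List (Int × Int))) (grafo : List (Int × List Int)) (start_vertices : List Int) (atribuicoes : List (Int × Int)) (out : Bool) : Decidable (Spec_propagar_local contador_vizinhos grafo start_vertices atribuicoes out) := by unfold Spec_propagar_local; infer_instance

-- ===== CLAIM (what is proved, stated in full; the proofs are below) =====
def Claim_equal_propagar_local : Prop := ∀ (contador_vizinhos : List (Int × List (Int × Int))) (grafo : List (Int × List Int)) (start_vertices : List Int) (atribuicoes : List (Int × Int)), Dom_propagar_local contador_vizinhos grafo start_vertices atribuicoes → Pre_propagar_local contador_vizinhos grafo start_vertices atribuicoes → Spec_propagar_local contador_vizinhos grafo start_vertices atribuicoes (propagar_local contador_vizinhos grafo start_vertices atribuicoes)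

-- ===== LEMMAS AND PROOFS =====

-- A's reachability skeleton: the same worklist as pvLoopA, recording only the visited set.
def pvReach (grafo : List (Int × List Int)) (atrib : List (Int × Int)) : Nat → List Int → PySem.Set Int → PySem.Set Int
  | _, [], vis => vis
  | 0, _ :: _, vis => vis
  | n+1, v :: rest, vis =>
    if v ∈ vis then pvReach grafo atrib n rest vis
    else
      let vis' := PySem.Set.add vis v
      match (PySem.Dict.mk atrib).get? v with
      | none => pvReach grafo atrib n rest vis'
      | some val =>
        if val = -1 then pvReach grafo atrib n rest vis'
        else pvReach grafo atrib n (rest ++ (PySem.Dict.mk grafo).getD v []) vis'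

-- The vertices reachable from `start` along edges leaving non-(-1)-assigned vertices.
inductive pvReachSpec (grafo : List (Int × List Int)) (atrib : List (Int × Int)) (start : List Int) : Int → Prop
  | base {v : Int} : v ∈ start → pvReachSpec grafo atrib start v
  | step {v u : Int} : pvReachSpec grafo atrib start v →
      (PySem.Dict.mk atrib).getD v (-1) ≠ -1 →
      u ∈ (PySem.Dict.mk grafo).getD v [] → pvReachSpec grafo atrib start u

-- Everything already visited stays in the worklist's result.
theorem pvReach_mono (grafo : List (Int × List Int)) (atrib : List (Int × Int)) :
    ∀ (n : Nat) (fila : List Int) (vis : PySem.Set Int) (x : Int), x ∈ vis → x ∈ pvReach grafo atrib n fila vis := by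
  intro n
  induction n with
  | zero => intro fila vis x hx; cases fila <;> simpa [pvReach] using hx
  | succ n ih =>
    intro fila vis x hx
    cases fila with
    | nil => simpa [pvReach] using hx
    | cons v rest =>
      by_cases hv : v ∈ vis
      · simpa [pvReach, hv] using ih rest vis x hx
      · have hx' : x ∈ PySem.Set.add vis v := by simp [PySem.Set.mem_add, hx]
        cases hval : (PySem.Dict.mk atrib).get? v with
        | none => simpa [pvReach, hv, hval] using ih rest _ x hx'
        | some val =>
          by_cases hm1 : val = -1
          · simpa [pvReach, hv, hval, hm1] using ih rest _ x hx'
          · simpa [pvReach, hv, hval, hm1] using ih _ _ x hx'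

theorem pvReach_sound (grafo : List (Int × List Int)) (atrib : List (Int × Int)) (start : List Int) :
    ∀ (n : Nat) (fila : List Int) (vis : PySem.Set Int),
      (∀ x ∈ fila, pvReachSpec grafo atrib start x) → (∀ x ∈ vis, pvReachSpec grafo atrib start x) →
      ∀ x ∈ pvReach grafo atrib n fila vis, pvReachSpec grafo atrib start x := by
  intro n
  induction n with
  | zero =>
    intro fila vis hf hv x hx
    cases fila with
    | nil => exact hv x (by simpa [pvReach] using hx)
    | cons a t => exact hv x (by simpa [pvReach] using hx)
  | succ n ih =>
    intro fila vis hf hv x hx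
    cases fila with
    | nil => exact hv x (by simpa [pvReach] using hx)
    | cons v rest =>
      have hrest : ∀ y ∈ rest, pvReachSpec grafo atrib start y :=
        fun y hy => hf y (List.mem_cons_of_mem _ hy)
      by_cases hvv : v ∈ vis
      · simp only [pvReach, if_pos hvv] at hx
        exact ih rest vis hrest hv x hx
      · have hv' : ∀ y ∈ PySem.Set.add vis v, pvReachSpec grafo atrib start y := by
          intro y hy
          rcases (PySem.Set.mem_add vis v y).1 hy with h | h
          · exact hv y h
          · exact h ▸ hf v List.mem_cons_self
        cases hval : (PySem.Dict.mk atrib).get? v with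
        | none =>
          simp only [pvReach, if_neg hvv, hval] at hx
          exact ih rest _ hrest hv' x hx
        | some val =>
          by_cases hm1 : val = -1
          · simp [pvReach, hvv, hval, hm1] at hx
            rw [← PySem.Set.add_of_not_mem hvv] at hx
            exact ih rest _ hrest hv' x hx
          · simp [pvReach, hvv, hval, hm1] at hx
            rw [← PySem.Set.add_of_not_mem hvv] at hx
            refine ih _ _ ?_ hv' x hx
            intro y hy
            rcases List.mem_append.1 hy with h | h
            · exact hrest y h
            · have hact : (PySem.Dict.mk atrib).getD v (-1) ≠ -1 := by
                rw [PySem.Dict.getD_eq_get?_getD, hval]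
                simpa using hm1
              exact pvReachSpec.step (hf v List.mem_cons_self) hact h

-- fuel slack that the not-yet-visited graph entries can still inject into the queue
def pvSlack (grafo : List (Int × List Int)) (vis : PySem.Set Int) : Nat :=
  ((grafo.filter (fun p => decide (p.1 ∉ vis))).map (fun p => p.2.length)).sum

theorem pvSlack_mono (grafo : List (Int × List Int)) (vis : PySem.Set Int) (v : Int) :
    pvSlack grafo (PySem.Set.add vis v) ≤ pvSlack grafo vis := by
  induction grafo with
  | nil => simp [pvSlack]
  | cons p t ih =>
    simp only [pvSlack, List.filter_cons] at *
    by_cases h1 : p.1 ∈ PySem.Set.add vis v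
    · have e1 : (decide (p.1 ∉ PySem.Set.add vis v)) = false := decide_eq_false (not_not_intro h1)
      by_cases h2 : p.1 ∈ vis
      · have e2 : (decide (p.1 ∉ vis)) = false := decide_eq_false (not_not_intro h2)
        simpa [e1, e2] using ih
      · have e2 : (decide (p.1 ∉ vis)) = true := decide_eq_true h2
        rw [e1, e2, if_neg Bool.false_ne_true, if_pos rfl]
        simp only [List.map_cons, List.sum_cons]
        omega
    · have h2 : p.1 ∉ vis := fun hm => h1 ((PySem.Set.mem_add vis v p.1).2 (Or.inl hm))
      have e1 : (decide (p.1 ∉ PySem.Set.add vis v)) = true := decide_eq_true h1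
      have e2 : (decide (p.1 ∉ vis)) = true := decide_eq_true h2
      rw [e1, e2, if_pos rfl, if_pos rfl]
      simp only [List.map_cons, List.sum_cons]
      omega

theorem pvSlack_add (grafo : List (Int × List Int)) (vis : PySem.Set Int) (v : Int) (hv : v ∉ vis) :
    ((PySem.Dict.mk grafo).getD v []).length + pvSlack grafo (PySem.Set.add vis v) ≤ pvSlack grafo vis := by
  induction grafo with
  | nil => simp [pvSlack, PySem.Dict.getD_eq_get?_getD, PySem.Dict.get?]
  | cons p t ih =>
    rw [PySem.Dict.getD_eq_get?_getD, PySem.Dict.get?_mk_cons]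
    by_cases hk : p.1 = v
    · have h2 : p.1 ∉ vis := hk ▸ hv
      have h1 : p.1 ∈ PySem.Set.add vis v := (PySem.Set.mem_add vis v p.1).2 (Or.inr hk)
      have e1 : (decide (p.1 ∉ PySem.Set.add vis v)) = false := decide_eq_false (not_not_intro h1)
      have e2 : (decide (p.1 ∉ vis)) = true := decide_eq_true h2
      have hsl := pvSlack_mono t vis v
      rw [if_pos (beq_iff_eq.mpr hk)]
      simp only [Option.getD_some, pvSlack, List.filter_cons] at hsl ⊢
      rw [e1, e2, if_neg Bool.false_ne_true, if_pos rfl]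
      simp only [List.map_cons, List.sum_cons]
      omega
    · rw [if_neg (by simpa using hk), ← PySem.Dict.getD_eq_get?_getD]
      by_cases h2 : p.1 ∈ vis
      · have h1 : p.1 ∈ PySem.Set.add vis v := (PySem.Set.mem_add vis v p.1).2 (Or.inl h2)
        have e1 : (decide (p.1 ∉ PySem.Set.add vis v)) = false := decide_eq_false (not_not_intro h1)
        have e2 : (decide (p.1 ∉ vis)) = false := decide_eq_false (not_not_intro h2)
        simp only [pvSlack, List.filter_cons] at ih ⊢
        simpa [e1, e2] using ih
      · have h1 : p.1 ∉ PySem.Set.add vis v := by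
          intro hm
          rcases (PySem.Set.mem_add vis v p.1).1 hm with h | h
          · exact h2 h
          · exact hk h
        have e1 : (decide (p.1 ∉ PySem.Set.add vis v)) = true := decide_eq_true h1
        have e2 : (decide (p.1 ∉ vis)) = true := decide_eq_true h2
        simp only [pvSlack, List.filter_cons] at ih ⊢
        rw [e1, e2, if_pos rfl, if_pos rfl]
        simp only [List.map_cons, List.sum_cons]
        omega

-- fuel adequacy for A's worklist: with enough fuel the result swallows the queue and is closed
theorem pvReach_key (grafo : List (Int × List Int)) (atrib : List (Int × Int)) :
    ∀ (n : Nat) (fila : List Int) (vis : PySem.Set Int),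
      fila.length + pvSlack grafo vis ≤ n →
      (∀ x ∈ fila, x ∈ pvReach grafo atrib n fila vis) ∧
      (∀ v, v ∈ pvReach grafo atrib n fila vis → v ∉ vis →
        (PySem.Dict.mk atrib).getD v (-1) ≠ -1 →
        ∀ u ∈ (PySem.Dict.mk grafo).getD v [], u ∈ pvReach grafo atrib n fila vis) := by
  intro n
  induction n with
  | zero =>
    intro fila vis hb
    cases fila with
    | nil =>
      refine ⟨fun x hx => absurd hx (List.not_mem_nil), fun w hwS hwv _ _ _ => ?_⟩
      exact absurd (by simpa [pvReach] using hwS) hwv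
    | cons a t => simp at hb
  | succ n ih =>
    intro fila vis hb
    cases fila with
    | nil =>
      refine ⟨fun x hx => absurd hx (List.not_mem_nil), fun w hwS hwv _ _ _ => ?_⟩
      exact absurd (by simpa [pvReach] using hwS) hwv
    | cons v rest =>
      simp only [List.length_cons] at hb
      by_cases hvv : v ∈ vis
      · have hred : pvReach grafo atrib (n+1) (v :: rest) vis = pvReach grafo atrib n rest vis := by
          simp [pvReach, hvv]
        obtain ⟨ih1, ih2⟩ := ih rest vis (by omega)
        refine ⟨?_, by rw [hred]; exact ih2⟩
        intro x hx
        rw [hred]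
        rcases List.mem_cons.1 hx with h | h
        · exact h ▸ pvReach_mono grafo atrib n rest vis v hvv
        · exact ih1 x h
      · have hvmem : v ∈ PySem.Set.add vis v := (PySem.Set.mem_add vis v v).2 (Or.inr rfl)
        have hnotadd : ∀ w, w ∉ vis → w ≠ v → w ∉ PySem.Set.add vis v := by
          intro w hw1 hw2 hm
          rcases (PySem.Set.mem_add vis v w).1 hm with h | h
          · exact hw1 h
          · exact hw2 h
        cases hval : (PySem.Dict.mk atrib).get? v with
        | none =>
          have hred : pvReach grafo atrib (n+1) (v :: rest) vis
              = pvReach grafo atrib n rest (PySem.Set.add vis v) := by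
            simp [pvReach, hvv, hval]
          have hsl := pvSlack_mono grafo vis v
          obtain ⟨ih1, ih2⟩ := ih rest (PySem.Set.add vis v) (by omega)
          refine ⟨?_, ?_⟩ <;> rw [hred]
          · intro x hx
            rcases List.mem_cons.1 hx with h | h
            · exact h ▸ pvReach_mono grafo atrib n rest _ v hvmem
            · exact ih1 x h
          · intro w hwS hwv hact u hu
            by_cases hwveq : w = v
            · exfalso
              apply hact
              rw [hwveq, PySem.Dict.getD_eq_get?_getD, hval]
              rfl
            · exact ih2 w hwS (hnotadd w hwv hwveq) hact u hu
        | some val =>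
          by_cases hm1 : val = -1
          · have hred : pvReach grafo atrib (n+1) (v :: rest) vis
                = pvReach grafo atrib n rest (PySem.Set.add vis v) := by
              simp [pvReach, hvv, hval, hm1]
            have hsl := pvSlack_mono grafo vis v
            obtain ⟨ih1, ih2⟩ := ih rest (PySem.Set.add vis v) (by omega)
            refine ⟨?_, ?_⟩ <;> rw [hred]
            · intro x hx
              rcases List.mem_cons.1 hx with h | h
              · exact h ▸ pvReach_mono grafo atrib n rest _ v hvmem
              · exact ih1 x h
            · intro w hwS hwv hact u hu
              by_cases hwveq : w = v
              · exfalso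
                apply hact
                rw [hwveq, PySem.Dict.getD_eq_get?_getD, hval, hm1]
                rfl
              · exact ih2 w hwS (hnotadd w hwv hwveq) hact u hu
          · have hred : pvReach grafo atrib (n+1) (v :: rest) vis
                = pvReach grafo atrib n (rest ++ (PySem.Dict.mk grafo).getD v []) (PySem.Set.add vis v) := by
              simp [pvReach, hvv, hval, hm1]
            have hsl := pvSlack_add grafo vis v hvv
            obtain ⟨ih1, ih2⟩ := ih (rest ++ (PySem.Dict.mk grafo).getD v []) (PySem.Set.add vis v)
              (by simp only [List.length_append]; omega)
            refine ⟨?_, ?_⟩ <;> rw [hred]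
            · intro x hx
              rcases List.mem_cons.1 hx with h | h
              · rw [h]; exact pvReach_mono grafo atrib n _ _ v hvmem
              · exact ih1 x (List.mem_append.2 (Or.inl h))
            · intro w hwS hwv hact u hu
              by_cases hwveq : w = v
              · exact ih1 u (List.mem_append.2 (Or.inr (hwveq ▸ hu)))
              · exact ih2 w hwS (hnotadd w hwv hwveq) hact u hu

theorem pvReach_iff (grafo : List (Int × List Int)) (atrib : List (Int × Int)) (start : List Int) (x : Int) :
    x ∈ pvReach grafo atrib (start.length + (grafo.map (fun p => p.2.length)).sum + 1) start PySem.Set.empty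
      ↔ pvReachSpec grafo atrib start x := by
  have hslack : pvSlack grafo PySem.Set.empty = (grafo.map (fun p => p.2.length)).sum := by
    simp [pvSlack, PySem.Set.empty]
  constructor
  · exact fun hx => pvReach_sound grafo atrib start _ start PySem.Set.empty
      (fun y hy => pvReachSpec.base hy) (fun y hy => absurd hy (List.not_mem_nil)) x hx
  · intro hspec
    obtain ⟨k1, k2⟩ := pvReach_key grafo atrib
      (start.length + (grafo.map (fun p => p.2.length)).sum + 1) start PySem.Set.empty
      (by rw [hslack]; omega)
    induction hspec with
    | base hv => exact k1 _ hv
    | step hsp hact hu ihm => exact k2 _ ihm (fun h => absurd h (List.not_mem_nil)) hact _ hu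

-- Adding a vertex the predicate holds at does not change an `all` over "visited or fine".
theorem pv_all_add (l vis : List Int) (v : Int) (f : Int → Bool) (hfv : f v = true) :
    (l.all fun x => (decide (x ∈ vis) || decide (x = v)) || f x) = (l.all fun x => decide (x ∈ vis) || f x) := by
  induction l with
  | nil => rfl
  | cons y t ih =>
    simp only [List.all_cons, ih]
    congr 1
    by_cases hy : y = v
    · subst hy; simp [hfv]
    · simp [hy]

-- A's fused loop equals "every visited vertex is already-visited or feasible" (same unconditional shape as before).
theorem pvLoopA_eq (contador : List (Int × List (Int × Int))) (grafo : List (Int × List Int)) (atrib : List (Int × Int)) :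
    ∀ (n : Nat) (fila : List Int) (vis : PySem.Set Int),
      pvLoopA contador grafo atrib n fila vis
        = (pvReach grafo atrib n fila vis).all (fun x => decide (x ∈ vis) || !pvInfeasible contador atrib x) := by
  intro n
  induction n with
  | zero =>
    intro fila vis
    cases fila <;> simp [pvLoopA, pvReach] <;> exact fun x hx => Or.inl hx
  | succ n ih =>
    intro fila vis
    cases fila with
    | nil =>
      simp [pvLoopA, pvReach]
      exact fun x hx => Or.inl hx
    | cons v rest =>
      by_cases hv : v ∈ vis
      · simp [pvLoopA, pvReach, hv, ih]
      · have hvmem : v ∈ PySem.Set.add vis v := by simp [PySem.Set.mem_add]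
        cases hval : (PySem.Dict.mk atrib).get? v with
        | none =>
          have hfv : (!pvInfeasible contador atrib v) = true := by
            simp [pvInfeasible, PySem.Dict.getD_eq_get?_getD, hval]
          simp [pvLoopA, pvReach, hv, hval, ih]
          try exact pv_all_add _ _ _ _ hfv
        | some val =>
          by_cases hm1 : val = -1
          · have hfv : (!pvInfeasible contador atrib v) = true := by
              simp [pvInfeasible, PySem.Dict.getD_eq_get?_getD, hval, hm1]
            simp [pvLoopA, pvReach, hv, hval, hm1, ih]
            try exact pv_all_add _ _ _ _ hfv
          · have hbadmem : pvInfeasible contador atrib v = true →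
                (pvReach grafo atrib (n+1) (v :: rest) vis).all
                  (fun x => decide (x ∈ vis) || !pvInfeasible contador atrib x) = false := by
              intro hbad
              have hvR : v ∈ pvReach grafo atrib (n+1) (v :: rest) vis := by
                simp only [pvReach, if_neg hv, hval, if_neg hm1]
                exact pvReach_mono grafo atrib n _ _ v hvmem
              rw [List.all_eq_false]
              exact ⟨v, hvR, by simp [hv, hbad]⟩
            by_cases h0 : val = 0
            · subst h0
              by_cases hc : (PySem.Dict.mk ((PySem.Dict.mk contador).getD v [])).getD 2 0 = 0 ∧ (PySem.Dict.mk ((PySem.Dict.mk contador).getD v [])).getD (-1) 0 = 0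
              · rw [hbadmem (by (have hc' := hc; simp only [PySem.Dict.getD_eq_get?_getD] at hc'; simp [pvInfeasible, PySem.Dict.getD_eq_get?_getD, hval, hc']))]
                simp [pvLoopA, hv, hval, hc]
              · have hfv : (!pvInfeasible contador atrib v) = true := by
                  (have hc' := hc; simp only [PySem.Dict.getD_eq_get?_getD] at hc'; simp [pvInfeasible, PySem.Dict.getD_eq_get?_getD, hval, hc'])
                simp [pvLoopA, pvReach, hv, hval, hc, ih]
                try exact pv_all_add _ _ _ _ hfv
            · by_cases h12 : val = 1 ∨ val = 2
              · by_cases hc : (PySem.Dict.mk ((PySem.Dict.mk contador).getD v [])).getD 1 0 + (PySem.Dict.mk ((PySem.Dict.mk contador).getD v [])).getD 2 0 = 0 ∧ (PySem.Dict.mk ((PySem.Dict.mk contador).getD v [])).getD (-1) 0 = 0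
                · rw [hbadmem (by rcases h12 with h | h <;> subst h <;>
                      (have hc' := hc; simp only [PySem.Dict.getD_eq_get?_getD] at hc'; simp [pvInfeasible, PySem.Dict.getD_eq_get?_getD, hval, hc']))]
                  rcases h12 with h | h <;> subst h <;> simp [pvLoopA, hv, hval, hc]
                · have hfv : (!pvInfeasible contador atrib v) = true := by
                    rcases h12 with h | h <;> subst h <;>
                      (have hc' := hc; simp only [PySem.Dict.getD_eq_get?_getD] at hc'; simp [pvInfeasible, PySem.Dict.getD_eq_get?_getD, hval, hc'])
                  rcases h12 with h | h <;> subst h <;>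
                    simp [pvLoopA, pvReach, hv, hval, hc, ih] <;>
                    exact pv_all_add _ _ _ _ hfv
              · have hfv : (!pvInfeasible contador atrib v) = true := by
                  simp [pvInfeasible, PySem.Dict.getD_eq_get?_getD, hval, h0, h12]
                simp [pvLoopA, pvReach, hv, hval, hm1, h0, h12, ih]
                try exact pv_all_add _ _ _ _ hfv

-- ---- B side: spec = reachable through checked, feasible propagation ----

inductive pvCSpec (contador : List (Int × List (Int × Int))) (grafo : List (Int × List Int)) (atrib : List (Int × Int)) (start : List Int) : Int → Prop
  | base {v : Int} : v ∈ start → pvCSpec contador grafo atrib start v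
  | step {v u : Int} : pvCSpec contador grafo atrib start v →
      (PySem.Dict.mk atrib).getD v (-1) ≠ -1 →
      pvInfeasible contador atrib v = false →
      u ∈ (PySem.Dict.mk grafo).getD v [] → pvCSpec contador grafo atrib start u

theorem pvCSpec_sub_big (contador : List (Int × List (Int × Int))) (grafo : List (Int × List Int)) (atrib : List (Int × Int)) (start : List Int) :
    ∀ x, pvCSpec contador grafo atrib start x → pvReachSpec grafo atrib start x := by
  intro x h
  induction h with
  | base hv => exact pvReachSpec.base hv
  | step _ hact _ hu ih => exact pvReachSpec.step ih hact hu

theorem pvBig_first (contador : List (Int × List (Int × Int))) (grafo : List (Int × List Int)) (atrib : List (Int × Int)) (start : List Int) :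
    ∀ x, pvReachSpec grafo atrib start x →
      (∃ b, pvCSpec contador grafo atrib start b ∧ pvInfeasible contador atrib b = true) ∨
      pvCSpec contador grafo atrib start x := by
  intro x h
  induction h with
  | base hv => exact Or.inr (pvCSpec.base hv)
  | @step v u _ hact hu ih =>
    rcases ih with h | hC
    · exact Or.inl h
    · by_cases hbad : pvInfeasible contador atrib v = true
      · exact Or.inl ⟨v, hC, hbad⟩
      · exact Or.inr (pvCSpec.step hC hact (by simpa using hbad) hu)

theorem pvCSpec_mono_seed (contador : List (Int × List (Int × Int))) (grafo : List (Int × List Int)) (atrib : List (Int × Int)) (S S' : List Int)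
    (h : ∀ y ∈ S, pvCSpec contador grafo atrib S' y) :
    ∀ x, pvCSpec contador grafo atrib S x → pvCSpec contador grafo atrib S' x := by
  intro x hx
  induction hx with
  | base hv => exact h _ hv
  | step _ hact hgood hu ih => exact pvCSpec.step ih hact hgood hu

-- ---- pvLayer lemmas ----

theorem pvLayer_none_iff (contador : List (Int × List (Int × Int))) (atrib : List (Int × Int)) :
    ∀ (vs : List Int) (exp : PySem.Set Int),
      pvLayer contador atrib vs exp = none ↔ ∃ v ∈ vs, pvInfeasible contador atrib v = true := by
  intro vs
  induction vs with
  | nil => intro exp; simp [pvLayer]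
  | cons v rest ih =>
    intro exp
    have hval : pvInviavelVal contador ((PySem.Dict.mk atrib).getD v (-1)) v = pvInfeasible contador atrib v := rfl
    by_cases hm1 : (PySem.Dict.mk atrib).getD v (-1) = -1
    · have hfv : pvInfeasible contador atrib v = false := by simp [pvInfeasible, hm1]
      rw [show pvLayer contador atrib (v :: rest) exp = pvLayer contador atrib rest exp from by
        simp [pvLayer, hm1]]
      rw [ih exp]
      simp [hfv]
    · by_cases hbad : pvInfeasible contador atrib v = true
      · rw [show pvLayer contador atrib (v :: rest) exp = none from by
          simp [pvLayer, hm1, hval, hbad]]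
        simp only [true_iff]
        exact ⟨v, List.mem_cons_self, hbad⟩
      · have hbad' : pvInviavelVal contador ((PySem.Dict.mk atrib).getD v (-1)) v = false := by
          rw [hval]; simpa using hbad
        rw [show pvLayer contador atrib (v :: rest) exp = pvLayer contador atrib rest (PySem.Set.add exp v) from by
          simp [pvLayer, hm1, hbad']]
        rw [ih (PySem.Set.add exp v)]
        constructor
        · rintro ⟨w, hw, hbw⟩
          exact ⟨w, List.mem_cons_of_mem _ hw, hbw⟩
        · rintro ⟨w, hw, hbw⟩
          rcases List.mem_cons.1 hw with h | h
          · exact absurd (h ▸ hbw) (by simpa using hbad)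
          · exact ⟨w, h, hbw⟩

theorem pvLayer_some_mem (contador : List (Int × List (Int × Int))) (atrib : List (Int × Int)) :
    ∀ (vs : List Int) (exp exp' : PySem.Set Int), pvLayer contador atrib vs exp = some exp' →
      ∀ x, x ∈ exp' ↔ x ∈ exp ∨ (x ∈ vs ∧ (PySem.Dict.mk atrib).getD x (-1) ≠ -1) := by
  intro vs
  induction vs with
  | nil =>
    intro exp exp' h x
    simp only [pvLayer, Option.some.injEq] at h
    simp [← h]
  | cons v rest ih =>
    intro exp exp' h x
    have hval : pvInviavelVal contador ((PySem.Dict.mk atrib).getD v (-1)) v = pvInfeasible contador atrib v := rfl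
    by_cases hm1 : (PySem.Dict.mk atrib).getD v (-1) = -1
    · rw [show pvLayer contador atrib (v :: rest) exp = pvLayer contador atrib rest exp from by
        simp [pvLayer, hm1]] at h
      rw [ih exp exp' h x]
      constructor
      · rintro (h | ⟨h1, h2⟩)
        · exact Or.inl h
        · exact Or.inr ⟨List.mem_cons_of_mem _ h1, h2⟩
      · rintro (h | ⟨h1, h2⟩)
        · exact Or.inl h
        · rcases List.mem_cons.1 h1 with h1 | h1
          · exact absurd (h1 ▸ hm1) h2
          · exact Or.inr ⟨h1, h2⟩
    · by_cases hbad : pvInfeasible contador atrib v = true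
      · rw [show pvLayer contador atrib (v :: rest) exp = none from by
          simp [pvLayer, hm1, hval, hbad]] at h
        exact absurd h (by simp)
      · have hbad' : pvInviavelVal contador ((PySem.Dict.mk atrib).getD v (-1)) v = false := by
          rw [hval]; simpa using hbad
        rw [show pvLayer contador atrib (v :: rest) exp = pvLayer contador atrib rest (PySem.Set.add exp v) from by
          simp [pvLayer, hm1, hbad']] at h
        rw [ih _ exp' h x]
        constructor
        · rintro (h | ⟨h1, h2⟩)
          · rcases (PySem.Set.mem_add exp v x).1 h with h | h
            · exact Or.inl h
            · exact Or.inr ⟨List.mem_cons.2 (Or.inl h), h ▸ hm1⟩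
          · exact Or.inr ⟨List.mem_cons_of_mem _ h1, h2⟩
        · rintro (h | ⟨h1, h2⟩)
          · exact Or.inl ((PySem.Set.mem_add exp v x).2 (Or.inl h))
          · rcases List.mem_cons.1 h1 with h1 | h1
            · exact Or.inl ((PySem.Set.mem_add exp v x).2 (Or.inr h1))
            · exact Or.inr ⟨h1, h2⟩

theorem pvLayer_some_nodup (contador : List (Int × List (Int × Int))) (atrib : List (Int × Int)) :
    ∀ (vs : List Int) (exp exp' : PySem.Set Int), pvLayer contador atrib vs exp = some exp' →
      exp.Nodup → exp'.Nodup := by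
  intro vs
  induction vs with
  | nil =>
    intro exp exp' h hnd
    simp only [pvLayer, Option.some.injEq] at h
    exact h ▸ hnd
  | cons v rest ih =>
    intro exp exp' h hnd
    have hval : pvInviavelVal contador ((PySem.Dict.mk atrib).getD v (-1)) v = pvInfeasible contador atrib v := rfl
    by_cases hm1 : (PySem.Dict.mk atrib).getD v (-1) = -1
    · rw [show pvLayer contador atrib (v :: rest) exp = pvLayer contador atrib rest exp from by
        simp [pvLayer, hm1]] at h
      exact ih exp exp' h hnd
    · by_cases hbad : pvInfeasible contador atrib v = true
      · rw [show pvLayer contador atrib (v :: rest) exp = none from by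
          simp [pvLayer, hm1, hval, hbad]] at h
        exact absurd h (by simp)
      · have hbad' : pvInviavelVal contador ((PySem.Dict.mk atrib).getD v (-1)) v = false := by
          rw [hval]; simpa using hbad
        rw [show pvLayer contador atrib (v :: rest) exp = pvLayer contador atrib rest (PySem.Set.add exp v) from by
          simp [pvLayer, hm1, hbad']] at h
        exact ih _ exp' h (PySem.Set.nodup_add exp v hnd)

-- ---- pvSweep lemmas ----

theorem pvSweepInner_mem (reach : PySem.Set Int) :
    ∀ (l : List Int) (acc : PySem.Set Int) (x : Int),
      x ∈ l.foldl (fun acc u => if u ∈ reach then acc else PySem.Set.add acc u) acc ↔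
        x ∈ acc ∨ (x ∈ l ∧ x ∉ reach) := by
  intro l
  induction l with
  | nil => intro acc x; simp
  | cons u t ih =>
    intro acc x
    simp only [List.foldl_cons]
    by_cases hu : u ∈ reach
    · rw [if_pos hu, ih]
      constructor
      · rintro (h | ⟨h1, h2⟩)
        · exact Or.inl h
        · exact Or.inr ⟨List.mem_cons_of_mem _ h1, h2⟩
      · rintro (h | ⟨h1, h2⟩)
        · exact Or.inl h
        · rcases List.mem_cons.1 h1 with h1 | h1
          · exact absurd (h1 ▸ hu) h2
          · exact Or.inr ⟨h1, h2⟩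
    · rw [if_neg hu, ih]
      constructor
      · rintro (h | ⟨h1, h2⟩)
        · rcases (PySem.Set.mem_add acc u x).1 h with h | h
          · exact Or.inl h
          · exact Or.inr ⟨List.mem_cons.2 (Or.inl h), h ▸ hu⟩
        · exact Or.inr ⟨List.mem_cons_of_mem _ h1, h2⟩
      · rintro (h | ⟨h1, h2⟩)
        · exact Or.inl ((PySem.Set.mem_add acc u x).2 (Or.inl h))
        · rcases List.mem_cons.1 h1 with h1 | h1
          · exact Or.inl ((PySem.Set.mem_add acc u x).2 (Or.inr h1))
          · exact Or.inr ⟨h1, h2⟩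

theorem pvSweep_mem (grafo : List (Int × List Int)) (exp reach : PySem.Set Int) (x : Int) :
    x ∈ pvSweep grafo exp reach ↔ (∃ p ∈ grafo, p.1 ∈ exp ∧ x ∈ p.2) ∧ x ∉ reach := by
  have aux : ∀ (g : List (Int × List Int)) (acc : PySem.Set Int),
      x ∈ g.foldl (fun acc p =>
        if p.1 ∈ exp then
          p.2.foldl (fun acc u => if u ∈ reach then acc else PySem.Set.add acc u) acc
        else acc) acc ↔ x ∈ acc ∨ ((∃ p ∈ g, p.1 ∈ exp ∧ x ∈ p.2) ∧ x ∉ reach) := by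
    intro g
    induction g with
    | nil => intro acc; simp
    | cons p t ih =>
      intro acc
      simp only [List.foldl_cons]
      by_cases hp : p.1 ∈ exp
      · rw [if_pos hp, ih, pvSweepInner_mem]
        constructor
        · rintro ((h | ⟨h1, h2⟩) | ⟨⟨q, hq, hq1, hq2⟩, h2⟩)
          · exact Or.inl h
          · exact Or.inr ⟨⟨p, List.mem_cons_self, hp, h1⟩, h2⟩
          · exact Or.inr ⟨⟨q, List.mem_cons_of_mem _ hq, hq1, hq2⟩, h2⟩
        · rintro (h | ⟨⟨q, hq, hq1, hq2⟩, h2⟩)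
          · exact Or.inl (Or.inl h)
          · rcases List.mem_cons.1 hq with h | h
            · exact Or.inl (Or.inr ⟨h ▸ hq2, h2⟩)
            · exact Or.inr ⟨⟨q, h, hq1, hq2⟩, h2⟩
      · rw [if_neg hp, ih]
        constructor
        · rintro (h | ⟨⟨q, hq, hq1, hq2⟩, h2⟩)
          · exact Or.inl h
          · exact Or.inr ⟨⟨q, List.mem_cons_of_mem _ hq, hq1, hq2⟩, h2⟩
        · rintro (h | ⟨⟨q, hq, hq1, hq2⟩, h2⟩)
          · exact Or.inl h
          · rcases List.mem_cons.1 hq with h | h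
            · exact absurd (h ▸ hq1) hp
            · exact Or.inr ⟨⟨q, h, hq1, hq2⟩, h2⟩
  rw [pvSweep, aux]
  simp [PySem.Set.empty]

-- ---- helpers ----

theorem pvLenLe (l l' : List Int) (h : l.Nodup) (hs : ∀ x ∈ l, x ∈ l') : l.length ≤ l'.length :=
  calc l.length = l.toFinset.card := (List.toFinset_card_of_nodup h).symm
    _ ≤ l'.toFinset.card := Finset.card_le_card
        (fun x hx => List.mem_toFinset.2 (hs x (List.mem_toFinset.1 hx)))
    _ ≤ l'.length := l'.toFinset_card_le

theorem pvGetD_of_mem_nodup (grafo : List (Int × List Int)) (hk : (grafo.map Prod.fst).Nodup)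
    (p : Int × List Int) (hp : p ∈ grafo) : (PySem.Dict.mk grafo).getD p.1 [] = p.2 := by
  have hkeys : (PySem.Dict.mk grafo).keys.Nodup := by
    simpa [PySem.Dict.keys] using hk
  have hget := PySem.Dict.get?_of_mem_items (d := PySem.Dict.mk grafo) (k := p.1) (v := p.2)
    (by exact hp) hkeys
  rw [PySem.Dict.getD_eq_get?_getD, hget]
  rfl

theorem pvEntry_of_getD (grafo : List (Int × List Int)) (v u : Int)
    (h : u ∈ (PySem.Dict.mk grafo).getD v []) : ∃ p ∈ grafo, p.1 = v ∧ u ∈ p.2 := by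
  rw [PySem.Dict.getD_eq_get?_getD] at h
  cases hget : (PySem.Dict.mk grafo).get? v with
  | none => rw [hget] at h; simp at h
  | some l =>
    rw [hget] at h
    simp only [Option.getD_some] at h
    exact ⟨(v, l), PySem.Dict.mem_items_of_get?_eq_some _ hget, rfl, h⟩

-- ---- the main loop invariant for B ----

theorem pvLoopB_key (contador : List (Int × List (Int × Int))) (grafo : List (Int × List Int)) (atrib : List (Int × Int))
    (hk : (grafo.map Prod.fst).Nodup) (U : List Int)
    (hU : ∀ p ∈ grafo, ∀ u ∈ p.2, u ∈ U) :
    ∀ (n : Nat) (reach exp new : PySem.Set Int),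
      reach.Nodup → exp.Nodup →
      (∀ x ∈ new, x ∉ reach) →
      (∀ x ∈ reach, x ∈ U) → (∀ x ∈ new, x ∈ U) →
      U.length + 1 ≤ n + reach.length →
      (∀ v ∈ exp, v ∈ reach) →
      (∀ v ∈ exp, (PySem.Dict.mk atrib).getD v (-1) ≠ -1 ∧ pvInfeasible contador atrib v = false) →
      (∀ v ∈ reach, (PySem.Dict.mk atrib).getD v (-1) ≠ -1 → pvInfeasible contador atrib v = false → v ∈ exp) →
      (∀ v ∈ reach, pvInfeasible contador atrib v = false) →
      (∀ v ∈ exp, ∀ u ∈ (PySem.Dict.mk grafo).getD v [], u ∈ reach ∨ u ∈ new) →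
      (pvLoopB contador grafo atrib n reach exp new = true ↔
        ∀ x, pvCSpec contador grafo atrib (reach ++ new) x → pvInfeasible contador atrib x = false) := by
  have closed_nil : ∀ (reach exp : PySem.Set Int),
      (∀ v ∈ reach, (PySem.Dict.mk atrib).getD v (-1) ≠ -1 → pvInfeasible contador atrib v = false → v ∈ exp) →
      (∀ v ∈ reach, pvInfeasible contador atrib v = false) →
      (∀ v ∈ exp, ∀ u ∈ (PySem.Dict.mk grafo).getD v [], u ∈ reach ∨ u ∈ ([] : List Int)) →
      ∀ x, pvCSpec contador grafo atrib (reach ++ []) x → pvInfeasible contador atrib x = false := by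
    intro reach exp hexp2 hgood hsw x hx
    have hmem : ∀ y, pvCSpec contador grafo atrib (reach ++ []) y → y ∈ reach := by
      intro y hy
      induction hy with
      | base hv => simpa using hv
      | @step v u _ hact hg hu ih =>
        rcases hsw v (hexp2 v ih hact hg) u hu with h | h
        · exact h
        · exact absurd h (List.not_mem_nil)
    exact hgood x (hmem x hx)
  intro n
  induction n with
  | zero =>
    intro reach exp new hnd hnde hdisj hsubR hsubN hb hexps hexp1 hexp2 hgood hsw
    cases new with
    | nil => exact ⟨fun _ => closed_nil reach exp hexp2 hgood hsw, fun _ => rfl⟩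
    | cons v rest => exact absurd (pvLenLe reach U hnd hsubR) (by omega)
  | succ n ih =>
    intro reach exp new hnd hnde hdisj hsubR hsubN hb hexps hexp1 hexp2 hgood hsw
    cases new with
    | nil => exact ⟨fun _ => closed_nil reach exp hexp2 hgood hsw, fun _ => rfl⟩
    | cons v rest =>
      simp only [pvLoopB]
      cases hlayer : pvLayer contador atrib (PySem.List.sorted (v :: rest) (fun x => x)) exp with
      | none =>
        obtain ⟨b, hbmem, hbbad⟩ := (pvLayer_none_iff contador atrib _ exp).1 hlayer
        have hbmem' : b ∈ v :: rest := (PySem.List.mem_sorted _ _ _ _).1 hbmem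
        refine ⟨fun h => absurd h (by simp), fun H => ?_⟩
        exact absurd (H b (pvCSpec.base (List.mem_append.2 (Or.inr hbmem'))))
          (by simp [hbbad])
      | some exp' =>
        have hgood_new : ∀ x ∈ v :: rest, pvInfeasible contador atrib x = false := by
          intro x hx
          by_contra hbad
          rw [(pvLayer_none_iff contador atrib _ exp).2
            ⟨x, (PySem.List.mem_sorted _ _ _ _).2 hx, by simpa using hbad⟩] at hlayer
          cases hlayer
        have hmem' : ∀ x, x ∈ exp' ↔ x ∈ exp ∨ (x ∈ v :: rest ∧ (PySem.Dict.mk atrib).getD x (-1) ≠ -1) := by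
          intro x
          rw [pvLayer_some_mem contador atrib _ exp exp' hlayer x, PySem.List.mem_sorted]
        have hnde' : exp'.Nodup := pvLayer_some_nodup contador atrib _ exp exp' hlayer hnde
        have hmemR' : ∀ x, x ∈ PySem.Set.update reach (v :: rest) ↔ x ∈ reach ∨ x ∈ v :: rest :=
          fun x => PySem.Set.mem_update reach (v :: rest) x
        have hnd' : (PySem.Set.update reach (v :: rest)).Nodup := PySem.Set.nodup_update reach _ hnd
        have hmemN' : ∀ x, x ∈ pvSweep grafo exp' (PySem.Set.update reach (v :: rest)) ↔
            (∃ p ∈ grafo, p.1 ∈ exp' ∧ x ∈ p.2) ∧ x ∉ PySem.Set.update reach (v :: rest) :=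
          fun x => pvSweep_mem grafo exp' _ x
        -- invariants for the recursive call
        have hexps' : ∀ w ∈ exp', w ∈ PySem.Set.update reach (v :: rest) := by
          intro w hw
          rcases (hmem' w).1 hw with h | ⟨h, _⟩
          · exact (hmemR' w).2 (Or.inl (hexps w h))
          · exact (hmemR' w).2 (Or.inr h)
        have hexp1' : ∀ w ∈ exp', (PySem.Dict.mk atrib).getD w (-1) ≠ -1 ∧ pvInfeasible contador atrib w = false := by
          intro w hw
          rcases (hmem' w).1 hw with h | ⟨h1, h2⟩
          · exact hexp1 w h
          · exact ⟨h2, hgood_new w h1⟩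
        have hexp2' : ∀ w ∈ PySem.Set.update reach (v :: rest),
            (PySem.Dict.mk atrib).getD w (-1) ≠ -1 → pvInfeasible contador atrib w = false → w ∈ exp' := by
          intro w hw hact hg
          rcases (hmemR' w).1 hw with h | h
          · exact (hmem' w).2 (Or.inl (hexp2 w h hact hg))
          · exact (hmem' w).2 (Or.inr ⟨h, hact⟩)
        have hgood' : ∀ w ∈ PySem.Set.update reach (v :: rest), pvInfeasible contador atrib w = false := by
          intro w hw
          rcases (hmemR' w).1 hw with h | h
          · exact hgood w h
          · exact hgood_new w h
        have hdisj' : ∀ x ∈ pvSweep grafo exp' (PySem.Set.update reach (v :: rest)),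
            x ∉ PySem.Set.update reach (v :: rest) := fun x hx => ((hmemN' x).1 hx).2
        have hsubR' : ∀ x ∈ PySem.Set.update reach (v :: rest), x ∈ U := by
          intro x hx
          rcases (hmemR' x).1 hx with h | h
          · exact hsubR x h
          · exact hsubN x h
        have hsubN' : ∀ x ∈ pvSweep grafo exp' (PySem.Set.update reach (v :: rest)), x ∈ U := by
          intro x hx
          obtain ⟨⟨p, hp, _, hx2⟩, _⟩ := (hmemN' x).1 hx
          exact hU p hp x hx2
        have hsw' : ∀ w ∈ exp', ∀ u ∈ (PySem.Dict.mk grafo).getD w [],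
            u ∈ PySem.Set.update reach (v :: rest) ∨ u ∈ pvSweep grafo exp' (PySem.Set.update reach (v :: rest)) := by
          intro w hw u hu
          by_cases hur : u ∈ PySem.Set.update reach (v :: rest)
          · exact Or.inl hur
          · obtain ⟨p, hp, hp1, hu2⟩ := pvEntry_of_getD grafo w u hu
            exact Or.inr ((hmemN' u).2 ⟨⟨p, hp, hp1 ▸ hw, hu2⟩, hur⟩)
        have hb' : U.length + 1 ≤ n + (PySem.Set.update reach (v :: rest)).length := by
          have hvnr : v ∉ reach := hdisj v List.mem_cons_self
          have hndv : (reach ++ [v]).Nodup := by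
            rw [List.nodup_append]
            refine ⟨hnd, List.nodup_singleton v, ?_⟩
            intro a ha b hb
            simp only [List.mem_singleton] at hb
            subst hb
            exact fun heq => hvnr (heq ▸ ha)
          have hsubv : ∀ x ∈ reach ++ [v], x ∈ PySem.Set.update reach (v :: rest) := by
            intro x hx
            rcases List.mem_append.1 hx with h | h
            · exact (hmemR' x).2 (Or.inl h)
            · exact (hmemR' x).2 (Or.inr (List.mem_cons.2 (Or.inl (by simpa using h))))
          have := pvLenLe (reach ++ [v]) _ hndv hsubv
          simp only [List.length_append, List.length_cons, List.length_nil] at this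
          omega
        have hrec := ih (PySem.Set.update reach (v :: rest)) exp'
          (pvSweep grafo exp' (PySem.Set.update reach (v :: rest)))
          hnd' hnde' hdisj' hsubR' hsubN' hb' hexps' hexp1' hexp2' hgood' hsw'
        rw [hrec]
        -- seed transfer between reach ++ (v :: rest) and reach' ++ new''
        have hseed1 : ∀ y ∈ PySem.Set.update reach (v :: rest) ++ pvSweep grafo exp' (PySem.Set.update reach (v :: rest)),
            pvCSpec contador grafo atrib (reach ++ (v :: rest)) y := by
          intro y hy
          rcases List.mem_append.1 hy with h | h
          · exact pvCSpec.base (List.mem_append.2 ((hmemR' y).1 h))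
          · obtain ⟨⟨p, hp, hp1, hy2⟩, _⟩ := (hmemN' y).1 h
            obtain ⟨hact, hg⟩ := hexp1' p.1 hp1
            have hbase : pvCSpec contador grafo atrib (reach ++ (v :: rest)) p.1 :=
              pvCSpec.base (List.mem_append.2 ((hmemR' p.1).1 (hexps' p.1 hp1)))
            exact pvCSpec.step hbase hact hg (by rw [pvGetD_of_mem_nodup grafo hk p hp]; exact hy2)
        have hseed2 : ∀ y ∈ reach ++ (v :: rest),
            pvCSpec contador grafo atrib
              (PySem.Set.update reach (v :: rest) ++ pvSweep grafo exp' (PySem.Set.update reach (v :: rest))) y := by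
          intro y hy
          exact pvCSpec.base (List.mem_append.2 (Or.inl ((hmemR' y).2 (List.mem_append.1 hy))))
        constructor
        · intro H x hx
          exact H x (pvCSpec_mono_seed contador grafo atrib _ _ hseed2 x hx)
        · intro H x hx
          exact H x (pvCSpec_mono_seed contador grafo atrib _ _ hseed1 x hx)

theorem pvB_iff (contador : List (Int × List (Int × Int))) (grafo : List (Int × List Int)) (start : List Int) (atrib : List (Int × Int))
    (hk : (grafo.map Prod.fst).Nodup) :
    propagar_local_alt contador grafo start atrib = true ↔
      ∀ x, pvCSpec contador grafo atrib start x → pvInfeasible contador atrib x = false := by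
  have hU : ∀ p ∈ grafo, ∀ u ∈ p.2, u ∈ start ++ (grafo.map (fun p => p.2)).flatten := by
    intro p hp u hu
    refine List.mem_append.2 (Or.inr ?_)
    exact List.mem_flatten.2 ⟨p.2, List.mem_map.2 ⟨p, hp, rfl⟩, hu⟩
  have hUlen : (start ++ (grafo.map (fun p => p.2)).flatten).length
      = start.length + (grafo.map (fun p => p.2.length)).sum := by
    rw [List.length_append, List.length_flatten, List.map_map]
    rfl
  have hkey := pvLoopB_key contador grafo atrib hk (start ++ (grafo.map (fun p => p.2)).flatten) hU
    (start.length + (grafo.map (fun p => p.2.length)).sum + 1)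
    PySem.Set.empty PySem.Set.empty (PySem.Set.ofList start)
    (by simp [PySem.Set.empty])
    (by simp [PySem.Set.empty])
    (by intro x _ h; exact absurd h (by simp [PySem.Set.empty]))
    (by intro x h; exact absurd h (by simp [PySem.Set.empty]))
    (fun x hx => List.mem_append.2 (Or.inl ((PySem.Set.mem_ofList start x).1 hx)))
    (by rw [hUlen]; simp [PySem.Set.empty])
    (by intro w h; exact absurd h (by simp [PySem.Set.empty]))
    (by intro w h; exact absurd h (by simp [PySem.Set.empty]))
    (by intro w h; exact absurd h (by simp [PySem.Set.empty]))
    (by intro w h; exact absurd h (by simp [PySem.Set.empty]))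
    (by intro w h; exact absurd h (by simp [PySem.Set.empty]))
  unfold propagar_local_alt
  rw [hkey]
  have hseed1 : ∀ y ∈ (PySem.Set.empty ++ PySem.Set.ofList start : List Int),
      pvCSpec contador grafo atrib start y := by
    intro y hy
    refine pvCSpec.base ((PySem.Set.mem_ofList start y).1 ?_)
    simpa [PySem.Set.empty] using hy
  have hseed2 : ∀ y ∈ start, pvCSpec contador grafo atrib (PySem.Set.empty ++ PySem.Set.ofList start) y := by
    intro y hy
    refine pvCSpec.base ?_
    simpa [PySem.Set.empty] using (PySem.Set.mem_ofList start y).2 hy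
  constructor
  · intro H x hx
    exact H x (pvCSpec_mono_seed contador grafo atrib _ _ hseed2 x hx)
  · intro H x hx
    exact H x (pvCSpec_mono_seed contador grafo atrib _ _ hseed1 x hx)

theorem pvA_iff (contador : List (Int × List (Int × Int))) (grafo : List (Int × List Int)) (start : List Int) (atrib : List (Int × Int)) :
    propagar_local contador grafo start atrib = true ↔
      ∀ x, pvReachSpec grafo atrib start x → pvInfeasible contador atrib x = false := by
  unfold propagar_local
  rw [pvLoopA_eq]
  simp only [PySem.Set.empty, List.not_mem_nil, decide_false, Bool.false_or]
  rw [List.all_eq_true]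
  constructor
  · intro H x hx
    simpa using H x ((pvReach_iff grafo atrib start x).2 hx)
  · intro H x hx
    simpa using H x ((pvReach_iff grafo atrib start x).1 hx)

-- ===== VERDICT (by name: the statement is the Claim_ definition above) =====
theorem propagar_local_spec : Claim_equal_propagar_local := by
  intro contador grafo start atrib _ hpre
  obtain ⟨hk, -⟩ := hpre
  unfold Spec_propagar_local
  rw [Bool.eq_iff_iff]
  refine (pvA_iff contador grafo start atrib).trans (Iff.trans ?_ (pvB_iff contador grafo start atrib hk).symm)
  constructor
  · exact fun H x hc => H x (pvCSpec_sub_big contador grafo atrib start x hc)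
  · intro H x hb
    rcases pvBig_first contador grafo atrib start x hb with ⟨b, hCb, hbad⟩ | hC
    · exact absurd hbad (by simp [H b hCb])
    · exact H x hC
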